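-- pv_equiv track=rewrite | github.com/lukeyigechen/optimality-theory-mark | src/ot_constraint.py | cons_rightmost
-- ===== SOURCE A (Python) =====
-- def cons_rightmost(list_syl_stress):
--     num_violate = 0
--     for syl_info in reversed(list_syl_stress):
--         if syl_info[-1] and 'p' in syl_info[0]:
--             break
--         else:
--             num_violate += len(syl_info[0])
--     return num_violate
-- ===== SOURCE B (Python) =====
-- def cons_rightmost(list_syl_stress):
--     idx = -1
--     for i, syl in enumerate(list_syl_stress):
--         if syl[-1] and 'p' in syl[0]:
--             idx = i
--     return sum(len(syl[0]) for syl in list_syl_stress[idx + 1:])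
-- ===== Notes on version B (the rewrite author's own statement) =====
-- stated objective: alternative
-- what changed: Replaces the reverse-iteration loop with early break by a forward pass that records the index of the last stressed 'p'-syllable, followed by a separate summation of the syllable lengths after that boundary.
import Mathlib
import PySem

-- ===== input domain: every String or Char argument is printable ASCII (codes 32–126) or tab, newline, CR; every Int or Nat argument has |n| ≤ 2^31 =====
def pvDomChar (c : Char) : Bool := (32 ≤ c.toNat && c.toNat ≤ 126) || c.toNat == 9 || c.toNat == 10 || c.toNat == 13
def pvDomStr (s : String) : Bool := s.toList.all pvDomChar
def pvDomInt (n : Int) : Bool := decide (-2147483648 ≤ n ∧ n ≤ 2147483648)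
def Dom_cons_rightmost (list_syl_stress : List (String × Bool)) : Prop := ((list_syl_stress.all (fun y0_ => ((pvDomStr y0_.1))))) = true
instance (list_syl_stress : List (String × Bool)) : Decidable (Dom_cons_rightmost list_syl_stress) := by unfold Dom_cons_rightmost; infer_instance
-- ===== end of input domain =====

-- B replaces A's reverse-iteration-with-break loop by a forward boundary-finding pass
-- plus a separate suffix summation (alternative decomposition, same cost).


-- ===== PORT A =====
-- the for-loop over reversed(list_syl_stress) with break and accumulator num_violate
def consA_loop : List (String × Bool) → Int → Int
  | [], acc => acc
  | (s, b) :: rest, acc =>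
      if b && PySem.Str.isIn "p" s then acc
      else consA_loop rest (acc + PySem.Str.len s)

def cons_rightmost (list_syl_stress : List (String × Bool)) : Int :=
  consA_loop list_syl_stress.reverse 0

-- ===== PORT B =====
-- forward pass: idx = index of the last syllable with syl[-1] and 'p' in syl[0], else -1
def altIdx (list_syl_stress : List (String × Bool)) : Int :=
  (PySem.List.enumerate list_syl_stress).foldl
    (fun acc p => if p.2.2 && PySem.Str.isIn "p" p.2.1 then p.1 else acc) (-1)

def cons_rightmost_alt (list_syl_stress : List (String × Bool)) : Int :=
  (PySem.List.slice list_syl_stress (some (altIdx list_syl_stress + 1)) none).foldl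
    (fun acc p => acc + PySem.Str.len p.1) 0

-- ===== PRECONDITION & SPEC =====
def Spec_cons_rightmost (list_syl_stress : List (String × Bool)) (out : Int) : Prop := out = cons_rightmost_alt list_syl_stress
instance (list_syl_stress : List (String × Bool)) (out : Int) : Decidable (Spec_cons_rightmost list_syl_stress out) := by unfold Spec_cons_rightmost; infer_instance

-- ===== CLAIM (what is proved, stated in full; the proofs are below) =====
def Claim_equal_cons_rightmost : Prop := ∀ (list_syl_stress : List (String × Bool)), Dom_cons_rightmost list_syl_stress → Spec_cons_rightmost list_syl_stress (cons_rightmost list_syl_stress)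

-- ===== LEMMAS AND PROOFS =====

theorem consA_loop_shift (l : List (String × Bool)) (acc : Int) :
    consA_loop l acc = acc + consA_loop l 0 := by
  induction l generalizing acc with
  | nil => simp [consA_loop]
  | cons x rest ih =>
      obtain ⟨s, b⟩ := x
      simp only [consA_loop]
      split
      · simp
      · rw [ih (acc + PySem.Str.len s), ih (0 + PySem.Str.len s)]; ring

theorem enumerate_append_singleton (l : List (String × Bool)) (x : String × Bool) (s : Int) :
    PySem.List.enumerate (l ++ [x]) s = PySem.List.enumerate l s ++ [(s + l.length, x)] := by
  induction l generalizing s with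
  | nil => simp [PySem.List.enumerate_cons, PySem.List.enumerate_nil]
  | cons y rest ih =>
      simp only [List.cons_append, PySem.List.enumerate_cons, ih]
      simp; ring_nf

theorem altIdx_append (l : List (String × Bool)) (x : String × Bool) :
    altIdx (l ++ [x]) =
      if x.2 && PySem.Str.isIn "p" x.1 then (l.length : Int) else altIdx l := by
  unfold altIdx
  rw [enumerate_append_singleton, List.foldl_append]
  simp

theorem altIdx_bounds (l : List (String × Bool)) :
    -1 ≤ altIdx l ∧ altIdx l < l.length := by
  induction l using List.reverseRecOn with
  | nil => simp [altIdx, PySem.List.enumerate_nil]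
  | append_singleton rest x ih =>
      rw [altIdx_append]
      split <;> simp [List.length_append] <;> omega

theorem equal_everywhere (l : List (String × Bool)) :
    cons_rightmost l = cons_rightmost_alt l := by
  induction l using List.reverseRecOn with
  | nil => simp [cons_rightmost, cons_rightmost_alt, consA_loop, altIdx,
      PySem.List.enumerate_nil, PySem.List.slice]
  | append_singleton rest x ih =>
      obtain ⟨s, b⟩ := x
      have hb := altIdx_bounds rest
      have hA : cons_rightmost (rest ++ [(s, b)]) =
          if b && PySem.Str.isIn "p" s then 0
          else PySem.Str.len s + cons_rightmost rest := by
        unfold cons_rightmost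
        rw [List.reverse_append]
        simp only [List.reverse_singleton, List.singleton_append, consA_loop]
        split
        · rfl
        · rw [consA_loop_shift]; ring
      rw [hA]
      unfold cons_rightmost_alt
      rw [altIdx_append]
      have hb' := altIdx_bounds rest
      by_cases hm : (b && PySem.Str.isIn "p" s) = true
      · rw [if_pos hm, if_pos hm]
        rw [PySem.List.slice_from _ (by omega)]
        have ht : ((rest.length : Int) + 1).toNat = rest.length + 1 := by omega
        rw [ht, List.drop_eq_nil_of_le (by simp)]
        simp
      · rw [if_neg hm, if_neg hm]
        have hrest : cons_rightmost_alt rest =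
            (List.drop (altIdx rest + 1).toNat rest).foldl
              (fun acc p => acc + PySem.Str.len p.1) 0 := by
          unfold cons_rightmost_alt
          rw [PySem.List.slice_from _ (by omega)]
        have hle : (altIdx rest + 1).toNat ≤ rest.length := by omega
        rw [PySem.List.slice_from _ (by omega), List.drop_append_of_le_length hle,
          List.foldl_append, ← hrest, ← ih]
        simp only [List.foldl_cons, List.foldl_nil]
        ring

-- ===== VERDICT (by name: the statement is the Claim_ definition above) =====
theorem cons_rightmost_spec : Claim_equal_cons_rightmost := by
  intro l _
  unfold Spec_cons_rightmost
  exact equal_everywhere l
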